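-- pv_equiv track=rewrite | github.com/pypi-data/pypi-mirror-96 | packages/getml/getml-0.15.0.tar.gz/getml-0.15.0/getml/data/visualization.py | _get_break_col
-- ===== SOURCE A (Python) =====
-- def _get_break_col(line, max_width):
--     cells = []
--     for index, cell in enumerate(line):
--         cells.append(cell)
--         width = len("   ".join(cells))
--         if width >= max_width:
--             return index
--     return len(line)
-- ===== SOURCE B (Python) =====
-- def _get_break_col(line, max_width):
--     # Precompute cumulative joined widths (width of line[:i+1] joined by "   "),
--     # then binary-search for the first prefix reaching max_width.
--     widths = []
--     total = 0
--     for i, cell in enumerate(line):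
--         total += len(cell)
--         widths.append(total + 3 * i)
--     lo, hi = 0, len(widths)
--     while lo < hi:
--         mid = (lo + hi) // 2
--         if widths[mid] < max_width:
--             lo = mid + 1
--         else:
--             hi = mid
--     return lo
-- ===== Notes on version B (the rewrite author's own statement) =====
-- stated objective: faster
-- what changed: Replaces the loop that re-joins the growing prefix on every step (quadratic in total text size) with a single pass building cumulative widths followed by a hand-written binary search for the first width >= max_width.
import Mathlib
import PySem

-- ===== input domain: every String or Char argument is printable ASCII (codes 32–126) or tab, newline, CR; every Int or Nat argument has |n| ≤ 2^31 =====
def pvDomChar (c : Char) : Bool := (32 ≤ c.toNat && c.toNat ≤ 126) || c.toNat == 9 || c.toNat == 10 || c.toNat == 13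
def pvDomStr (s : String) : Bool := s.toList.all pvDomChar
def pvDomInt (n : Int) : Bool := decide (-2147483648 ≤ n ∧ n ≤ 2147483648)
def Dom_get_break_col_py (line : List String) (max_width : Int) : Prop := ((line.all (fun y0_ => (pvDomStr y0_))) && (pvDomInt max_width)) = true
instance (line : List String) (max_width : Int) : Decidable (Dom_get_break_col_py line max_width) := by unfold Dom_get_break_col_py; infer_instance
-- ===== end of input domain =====

-- B replaces A's re-join of the growing prefix at every step by one cumulative-width
-- pass plus a binary search for the first prefix width >= max_width (objective: faster).

-- ===== PORT A =====
-- loop 'for index, cell in enumerate(line)' with accumulator cells; total = len(line) returned on fall-through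
def pvGoA (maxw total : Int) : List String → List String → Int → Int
  | _, [], _ => total
  | cells, c :: rest, idx =>
    let cells' := cells ++ [c]
    let width := PySem.Str.len (PySem.Str.join "   " cells')
    if width ≥ maxw then idx else pvGoA maxw total cells' rest (idx + 1)

def get_break_col_py (line : List String) (max_width : Int) : Int :=
  pvGoA max_width (PySem.List.len line) [] line 0

-- ===== PORT B =====
-- the widths-building loop of Source B
def pvWidthsB : List String → Int → Int → List Int
  | [], _, _ => []
  | c :: rest, total, i =>
    let total' := total + PySem.Str.len c
    (total' + 3 * i) :: pvWidthsB rest total' (i + 1)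

-- the hand-written bisect loop of Source B (widths[mid] is always in range when lo < hi ≤ len)
def pvBisectB (ws : List Int) (x : Int) (lo hi : Nat) : Nat :=
  if h : lo < hi then
    let mid := (lo + hi) / 2
    if ws.getD mid 0 < x then pvBisectB ws x (mid + 1) hi else pvBisectB ws x lo mid
  else lo
termination_by hi - lo
decreasing_by all_goals omega

def get_break_col_py_alt (line : List String) (max_width : Int) : Int :=
  let ws := pvWidthsB line 0 0
  ((pvBisectB ws max_width 0 ws.length : Nat) : Int)

-- ===== PRECONDITION & SPEC =====
def Spec_get_break_col_py (line : List String) (max_width : Int) (out : Int) : Prop := out = get_break_col_py_alt line max_width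
instance (line : List String) (max_width : Int) (out : Int) : Decidable (Spec_get_break_col_py line max_width out) := by unfold Spec_get_break_col_py; infer_instance

-- ===== CLAIM (what is proved, stated in full; the proofs are below) =====
def Claim_equal_get_break_col_py : Prop := ∀ (line : List String) (max_width : Int), Dom_get_break_col_py line max_width → Spec_get_break_col_py line max_width (get_break_col_py line max_width)

-- ===== LEMMAS AND PROOFS =====

-- sum of the cell lengths, the common currency of both proofs
def pvSumLen (cells : List String) : Int := (cells.map PySem.Str.len).sum

-- length of "   ".join(parts) for nonempty parts
theorem pvJoinLenChars (sep : List Char) : ∀ (q : List Char) (rest : List (List Char)),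
    (PySem.Chars.join sep (q :: rest)).length = q.length + (rest.map List.length).sum + sep.length * rest.length := by
  intro q rest
  induction rest generalizing q with
  | nil => simp [PySem.Chars.join_singleton]
  | cons r rs ih =>
    rw [PySem.Chars.join_cons_cons]
    simp [ih r]
    ring

theorem pvSumLenNat (cells : List String) :
    pvSumLen cells = ((cells.map (fun s => s.toList.length)).sum : Int) := by
  induction cells with
  | nil => simp [pvSumLen]
  | cons c cs ih => simp [pvSumLen, PySem.Str.len_eq] at ih ⊢; simp [ih]

theorem pvJoinLen (parts : List String) (h : parts ≠ []) :
    PySem.Str.len (PySem.Str.join "   " parts) = pvSumLen parts + 3 * ((parts.length : Int) - 1) := by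
  match parts with
  | q :: rest =>
    rw [PySem.Str.len_eq, PySem.Str.toList_join]
    simp only [List.map_cons]
    rw [pvJoinLenChars]
    have h3 : "   ".toList.length = 3 := by decide
    rw [h3, List.map_map]
    have hr := pvSumLenNat rest
    simp only [pvSumLen, List.map_cons, List.sum_cons, PySem.Str.len_eq] at hr ⊢
    rw [show (List.map PySem.Str.len rest).sum = (List.map (fun s => (s.toList.length : Int)) rest).sum by
      simpa [pvSumLen, PySem.Str.len_eq] using hr]
    push_cast [List.map_map, Function.comp_def, List.length_map, List.length_cons]
    ring

theorem pvWidthsB_length (rest : List String) (S i : Int) :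
    (pvWidthsB rest S i).length = rest.length := by
  induction rest generalizing S i with
  | nil => simp [pvWidthsB]
  | cons c r ih => simp [pvWidthsB, ih]

theorem pvWidthsB_lb (rest : List String) : ∀ (S i : Int),
    ∀ w ∈ pvWidthsB rest S i, S + 3 * i ≤ w := by
  induction rest with
  | nil => simp [pvWidthsB]
  | cons c r ih =>
    intro S i w hw
    have hc : (0 : Int) ≤ PySem.Str.len c := by
      rw [PySem.Str.len_eq]; positivity
    simp only [pvWidthsB, List.mem_cons] at hw
    rcases hw with h | h
    · omega
    · have := ih (S + PySem.Str.len c) (i + 1) w h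
      omega

theorem pvWidthsB_sorted (rest : List String) : ∀ (S i : Int),
    (pvWidthsB rest S i).Pairwise (· < ·) := by
  induction rest with
  | nil => intro S i; simp [pvWidthsB]
  | cons c r ih =>
    intro S i
    simp only [pvWidthsB, List.pairwise_cons]
    refine ⟨fun w hw => ?_, ih _ _⟩
    have := pvWidthsB_lb r (S + PySem.Str.len c) (i + 1) w hw
    omega

-- A's loop computes the first index of a sufficient cumulative width
theorem pvGoA_eq (rest : List String) : ∀ (cells : List String) (maxw total : Int),
    pvGoA maxw total cells rest (cells.length : Int)
      = (let ws := pvWidthsB rest (pvSumLen cells) (cells.length : Int)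
         let k := ws.findIdx (fun w => decide (maxw ≤ w))
         if k < rest.length then (cells.length : Int) + k else total) := by
  induction rest with
  | nil => intro cells maxw total; simp [pvGoA, pvWidthsB]
  | cons c r ih =>
    intro cells maxw total
    have hw := pvJoinLen (cells ++ [c]) (by simp)
    have hsum : pvSumLen (cells ++ [c]) = pvSumLen cells + PySem.Str.len c := by
      simp [pvSumLen]
    have hlen : (((cells ++ [c]).length : Nat) : Int) = (cells.length : Int) + 1 := by
      push_cast [List.length_append, List.length_cons, List.length_nil]; ring
    rw [hsum, hlen] at hw
    have hw' : PySem.Str.len (PySem.Str.join "   " (cells ++ [c]))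
        = pvSumLen cells + PySem.Str.len c + 3 * (cells.length : Int) := by
      rw [hw]; ring
    simp only [pvGoA, pvWidthsB, hw', List.findIdx_cons]
    set W := pvSumLen cells + PySem.Str.len c + 3 * (cells.length : Int) with hW
    by_cases hge : W ≥ maxw
    · rw [if_pos hge]
      have : decide (maxw ≤ W) = true := by simpa [ge_iff_le] using hge
      simp [this]
    · have hdec : decide (maxw ≤ W) = false := by
        simp [ge_iff_le] at hge ⊢; omega
      rw [if_neg hge]
      have hIH := ih (cells ++ [c]) maxw total
      rw [hsum, hlen] at hIH
      rw [hIH]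
      simp only [hdec, cond_false]
      have hlist : pvWidthsB r (pvSumLen cells + PySem.Str.len c) ((cells.length : Int) + 1)
          = pvWidthsB r (pvSumLen cells + PySem.Str.len c) ((cells.length : Int) + 1) := rfl
      set k' := (pvWidthsB r (pvSumLen cells + PySem.Str.len c) ((cells.length : Int) + 1)).findIdx
        (fun w => decide (maxw ≤ w)) with hk'
      by_cases hlt : k' < r.length
      · rw [if_pos hlt, if_pos (by simpa using Nat.succ_lt_succ hlt)]
        push_cast; ring
      · rw [if_neg hlt, if_neg (by simp [List.length_cons]; omega)]

theorem pvFindIdx_eq_of (ws : List Int) (p : Int → Bool) : ∀ (k : Nat), k ≤ ws.length →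
    (∀ (j : Nat) (hj : j < ws.length), j < k → p ws[j] = false) →
    (∀ (hk : k < ws.length), p ws[k] = true) →
    ws.findIdx p = k := by
  induction ws with
  | nil => intro k hk _ _; simp at hk; simp [hk]
  | cons a t ih =>
    intro k hk hlt hat
    match k with
    | 0 =>
      have := hat (by simp)
      simp only [List.getElem_cons_zero] at this
      simp [List.findIdx_cons, this]
    | k + 1 =>
      have h0 : p a = false := hlt 0 (by simp) (by omega)
      rw [List.findIdx_cons, h0, cond_false]
      have := ih k (by simpa using hk)
        (fun j hj hjk => by simpa using hlt (j + 1) (by simpa using hj) (by omega))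
        (fun hk' => by simpa using hat (by simpa using hk'))
      omega

-- B's binary search computes the same first index
theorem pvBisectB_eq (ws : List Int) (x : Int) (hs : ws.Pairwise (· < ·)) :
    ∀ (n lo hi : Nat), hi - lo ≤ n → hi ≤ ws.length → lo ≤ hi →
    (∀ (j : Nat) (hj : j < ws.length), j < lo → ws[j] < x) →
    (∀ (j : Nat) (hj : j < ws.length), hi ≤ j → x ≤ ws[j]) →
    pvBisectB ws x lo hi = ws.findIdx (fun w => decide (x ≤ w)) := by
  have hmono : ∀ (i j : Nat) (hi : i < ws.length) (hj : j < ws.length), i < j → ws[i] < ws[j] :=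
    List.pairwise_iff_getElem.mp hs
  intro n
  induction n with
  | zero =>
    intro lo hi hfuel hhi hlohi hlow hhigh
    rw [pvBisectB, dif_neg (by omega)]
    exact (pvFindIdx_eq_of ws _ lo (by omega)
      (fun j hj hjlo => by simpa using not_le.mpr (hlow j hj hjlo))
      (fun hk => by simpa using hhigh lo hk (by omega))).symm
  | succ n ih =>
    intro lo hi hfuel hhi hlohi hlow hhigh
    rw [pvBisectB]
    by_cases h : lo < hi
    · rw [dif_pos h]
      have hmidlt : (lo + hi) / 2 < hi := by omega
      have hmidge : lo ≤ (lo + hi) / 2 := by omega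
      have hmidlen : (lo + hi) / 2 < ws.length := by omega
      have hgetD : ws.getD ((lo + hi) / 2) 0 = ws[(lo + hi) / 2] := by
        rw [List.getD_eq_getElem?_getD, List.getElem?_eq_getElem hmidlen]; rfl
      show (if ws.getD ((lo + hi) / 2) 0 < x then pvBisectB ws x ((lo + hi) / 2 + 1) hi
            else pvBisectB ws x lo ((lo + hi) / 2)) = List.findIdx (fun w => decide (x ≤ w)) ws
      rw [hgetD]
      by_cases hc : ws[(lo + hi) / 2] < x
      · rw [if_pos hc]
        exact ih ((lo + hi) / 2 + 1) hi (by omega) hhi (by omega)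
          (fun j hj hjlt => by
            rcases Nat.lt_or_ge j ((lo + hi) / 2) with hj' | hj'
            · exact lt_trans (hmono j _ hj hmidlen hj') hc
            · have : j = (lo + hi) / 2 := by omega
              subst this; exact hc)
          hhigh
      · rw [if_neg hc]
        exact ih lo ((lo + hi) / 2) (by omega) (by omega) (by omega) hlow
          (fun j hj hjge => by
            rcases Nat.lt_or_ge ((lo + hi) / 2) j with hj' | hj'
            · exact le_of_lt (lt_of_le_of_lt (not_lt.mp hc) (hmono _ j hmidlen hj hj'))
            · have : j = (lo + hi) / 2 := by omega
              subst this; exact not_lt.mp hc)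
    · rw [dif_neg h]
      have hlohi' : lo = hi := by omega
      exact (pvFindIdx_eq_of ws _ lo (by omega)
        (fun j hj hjlo => by simpa using not_le.mpr (hlow j hj hjlo))
        (fun hk => by simpa using hhigh lo hk (by omega))).symm

-- ===== VERDICT (by name: the statement is the Claim_ definition above) =====
theorem get_break_col_py_spec : Claim_equal_get_break_col_py := by
  intro line maxw _
  show get_break_col_py line maxw = get_break_col_py_alt line maxw
  have hA := pvGoA_eq line [] maxw (PySem.List.len line)
  simp only [List.length_nil, Nat.cast_zero, pvSumLen, List.map_nil, List.sum_nil] at hA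
  have hlen := pvWidthsB_length line 0 0
  set ws := pvWidthsB line 0 0 with hws
  set k := ws.findIdx (fun w => decide (maxw ≤ w)) with hk
  have hkle : k ≤ ws.length := List.findIdx_le_length
  have hB : get_break_col_py_alt line maxw = (k : Int) := by
    unfold get_break_col_py_alt
    rw [← hws]
    show ((pvBisectB ws maxw 0 ws.length : Nat) : Int) = (k : Int)
    rw [hk]
    congr 1
    exact pvBisectB_eq ws maxw (pvWidthsB_sorted line 0 0) ws.length 0 ws.length
      (by omega) (le_refl _) (by omega)
      (fun j hj hjlo => by omega) (fun j hj hjge => by omega)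
  rw [hB]
  unfold get_break_col_py
  rw [hA]
  simp only [PySem.List.len_eq]
  by_cases hlt : k < line.length
  · rw [if_pos hlt]; ring
  · rw [if_neg hlt]
    have : k = line.length := by omega
    rw [this]
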